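-- pv_equiv track=rewrite | github.com/amenbrahem/Tetraminos | tetramino.py | maximaze_tet
-- ===== SOURCE A (Python) =====
-- def maximaze_tet(tet,dimensions,indc):
--     w,h=dimensions
--     coords=tet[0]
--     for i,coord in enumerate(coords):
--         coord=list(coord)
--         x,y=coord
--         if indc==1:
--             x=x
--             y=y
--         elif indc==2:
--             x=x + w
--             y=y
--         elif indc==3:
--             x=x+w*2+2
--             y=y
--         elif indc==4:
--             y=y+h
--             x=x
--         elif indc==5:
--             y=y + h
--             x=x + w * 2 + 2
--         elif indc==6:
--             y=y + h * 2 + 2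
--             x=x
--         elif indc==7:
--             y=y + h * 2 + 2
--             x=x + w
--         elif indc==8:
--             y=y+h*2+2
--             x=x+w*2+2
--         coord=x,y
--         coord=tuple(coord)
--         coords[i]=coord
--     tet[0]=coords
--     return tet
-- ===== SOURCE B (Python) =====
-- def maximaze_tet(tet, dimensions, indc):
--     # The eight placements are the cells of a 3x3 anchor grid (center cell unused),
--     # with column offsets 0, w, 2*w+2 and row offsets 0, h, 2*h+2. Decode indc
--     # arithmetically into (row, col) and derive the shift, instead of branching.
--     w, h = dimensions
--     dx = dy = 0
--     if 1 <= indc <= 8: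
--         pos = indc - 1 + (1 if indc >= 5 else 0)  # skip the unused center cell
--         row, col = divmod(pos, 3)
--         dx = col * w + 2 * (col // 2)
--         dy = row * h + 2 * (row // 2)
--     tet[0] = [(x + dx, y + dy) for x, y in tet[0]]
--     return tet
-- ===== Notes on version B (the rewrite author's own statement) =====
-- stated objective: alternative
-- what changed: Replaces the eight-branch per-element if/elif chain by an arithmetic decoding of indc into a (row,col) cell of the 3x3 anchor grid (divmod, skipping the unused center cell) from which the single (dx,dy) shift is computed, then one map over the coordinates.
import Mathlib
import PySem

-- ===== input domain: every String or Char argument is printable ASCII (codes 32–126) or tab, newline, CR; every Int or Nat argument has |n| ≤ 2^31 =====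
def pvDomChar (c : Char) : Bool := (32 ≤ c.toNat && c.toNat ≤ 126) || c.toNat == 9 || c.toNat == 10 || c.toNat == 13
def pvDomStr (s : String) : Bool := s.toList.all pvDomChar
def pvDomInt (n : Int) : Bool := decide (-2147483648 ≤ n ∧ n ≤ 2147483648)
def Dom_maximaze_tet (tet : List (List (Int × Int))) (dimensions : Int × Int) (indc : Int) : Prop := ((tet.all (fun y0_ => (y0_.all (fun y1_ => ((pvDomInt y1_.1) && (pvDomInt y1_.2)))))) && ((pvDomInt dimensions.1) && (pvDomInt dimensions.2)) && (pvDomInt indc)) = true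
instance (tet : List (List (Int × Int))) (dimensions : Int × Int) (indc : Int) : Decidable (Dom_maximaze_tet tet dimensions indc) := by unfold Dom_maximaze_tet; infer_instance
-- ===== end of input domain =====

-- B decodes indc arithmetically into a (row,col) cell of the 3x3 anchor grid (divmod, skipping
-- the unused center cell) and computes the single (dx,dy) shift from it, replacing A's
-- eight-branch per-element if/elif chain (alternative). Equivalence is about the RETURN value:
-- A mutates the inner list tet[0] in place, B rebinds tet[0] to a fresh list.

-- ===== PORT A =====
def maximaze_tet (tet : List (List (Int × Int))) (dimensions : Int × Int) (indc : Int) : List (List (Int × Int)) :=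
  let w := dimensions.1
  let h := dimensions.2
  match tet with
  | [] => []            -- Python: tet[0] raises IndexError here; excluded by Pre_
  | coords :: rest =>
    let coords :=
      (PySem.List.enumerate coords 0).foldl
        (fun acc p =>
          let x := p.2.1
          let y := p.2.2
          let xy : Int × Int :=
            if indc = 1 then (x, y)
            else if indc = 2 then (x + w, y)
            else if indc = 3 then (x + w * 2 + 2, y)
            else if indc = 4 then (x, y + h)
            else if indc = 5 then (x + w * 2 + 2, y + h)
            else if indc = 6 then (x, y + h * 2 + 2)
            else if indc = 7 then (x + w, y + h * 2 + 2)
            else if indc = 8 then (x + w * 2 + 2, y + h * 2 + 2)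
            else (x, y)
          acc.set p.1.toNat xy)   -- enumerate index is ≥ 0, so toNat is exact
        coords
    coords :: rest

-- ===== PORT B =====
def maximaze_tet_alt (tet : List (List (Int × Int))) (dimensions : Int × Int) (indc : Int) : List (List (Int × Int)) :=
  let w := dimensions.1
  let h := dimensions.2
  let d : Int × Int :=
    if 1 ≤ indc ∧ indc ≤ 8 then
      let pos := indc - 1 + (if 5 ≤ indc then 1 else 0)   -- skip the unused center cell
      let row := PySem.Int.floordiv pos 3
      let col := PySem.Int.mod pos 3
      (col * w + 2 * (PySem.Int.floordiv col 2), row * h + 2 * (PySem.Int.floordiv row 2))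
    else (0, 0)
  match tet with
  | [] => []            -- Python: tet[0] raises IndexError here; excluded by Pre_
  | coords :: rest => (coords.map (fun c => (c.1 + d.1, c.2 + d.2))) :: rest

-- ===== PRECONDITION & SPEC =====
-- A (and B) raise IndexError on tet = [] (tet[0]); Pre_ excludes exactly that.
def Pre_maximaze_tet (tet : List (List (Int × Int))) (dimensions : Int × Int) (indc : Int) : Prop := tet ≠ []
instance (tet : List (List (Int × Int))) (dimensions : Int × Int) (indc : Int) : Decidable (Pre_maximaze_tet tet dimensions indc) := by unfold Pre_maximaze_tet; infer_instance
def pvWitness_maximaze_tet : (List (List (Int × Int))) × (Int × Int) × Int := ([[(1, 2), (3, 4)]], (5, 6), 7)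

def Spec_maximaze_tet (tet : List (List (Int × Int))) (dimensions : Int × Int) (indc : Int) (out : List (List (Int × Int))) : Prop := out = maximaze_tet_alt tet dimensions indc
instance (tet : List (List (Int × Int))) (dimensions : Int × Int) (indc : Int) (out : List (List (Int × Int))) : Decidable (Spec_maximaze_tet tet dimensions indc out) := by unfold Spec_maximaze_tet; infer_instance

-- ===== CLAIM (what is proved, stated in full; the proofs are below) =====
def Claim_equal_maximaze_tet : Prop := ∀ (tet : List (List (Int × Int))) (dimensions : Int × Int) (indc : Int), Dom_maximaze_tet tet dimensions indc → Pre_maximaze_tet tet dimensions indc → Spec_maximaze_tet tet dimensions indc (maximaze_tet tet dimensions indc)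

-- ===== LEMMAS AND PROOFS =====

-- A's loop "coords[i] = f(coords[i])" over enumerate is map f.
theorem foldl_set_enumerate {α : Type} (f : α → α) :
    ∀ (xs pre : List α),
      (PySem.List.enumerate xs (pre.length : Int)).foldl
        (fun acc p => acc.set p.1.toNat (f p.2)) (pre ++ xs)
      = pre ++ xs.map f := by
  intro xs
  induction xs with
  | nil => intro pre; simp [PySem.List.enumerate_nil]
  | cons x xs ih =>
    intro pre
    rw [PySem.List.enumerate_cons]
    simp only [List.foldl_cons]
    have hset : (pre ++ x :: xs).set (pre.length : Int).toNat (f x)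
        = (pre ++ [f x]) ++ xs := by
      simp
    rw [hset]
    have hlen : ((pre.length : Int) + 1) = (((pre ++ [f x]).length : Int)) := by
      simp
    rw [hlen, ih (pre ++ [f x])]
    simp

theorem maximaze_tet_spec : Claim_equal_maximaze_tet := by
  intro tet dims indc _ hpre
  unfold Spec_maximaze_tet maximaze_tet maximaze_tet_alt
  match tet with
  | [] => exact absurd rfl hpre
  | coords :: rest =>
    simp only [List.cons.injEq, and_true]
    set w := dims.1
    set h := dims.2
    set f : Int × Int → Int × Int := fun c =>
      if indc = 1 then (c.1, c.2)
      else if indc = 2 then (c.1 + w, c.2)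
      else if indc = 3 then (c.1 + w * 2 + 2, c.2)
      else if indc = 4 then (c.1, c.2 + h)
      else if indc = 5 then (c.1 + w * 2 + 2, c.2 + h)
      else if indc = 6 then (c.1, c.2 + h * 2 + 2)
      else if indc = 7 then (c.1 + w, c.2 + h * 2 + 2)
      else if indc = 8 then (c.1 + w * 2 + 2, c.2 + h * 2 + 2)
      else (c.1, c.2) with hf
    have hloop := foldl_set_enumerate f coords ([] : List (Int × Int))
    simp only [List.length_nil, Int.natCast_zero, List.nil_append] at hloop
    rw [hloop]
    apply List.map_congr_left
    intro c _
    rw [hf]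
    by_cases h1 : indc = 1
    · subst h1; norm_num [PySem.Int.floordiv, PySem.Int.mod, show (((0:Int)).fdiv 3) = 0 from by decide, show (((0:Int)).fmod 3) = 0 from by decide, show (((0:Int)).emod 3) = 0 from by decide, show (((1:Int)).fdiv 3) = 0 from by decide, show (((1:Int)).fmod 3) = 1 from by decide, show (((1:Int)).emod 3) = 1 from by decide, show (((2:Int)).fdiv 3) = 0 from by decide, show (((2:Int)).fmod 3) = 2 from by decide, show (((2:Int)).emod 3) = 2 from by decide, show (((3:Int)).fdiv 3) = 1 from by decide, show (((3:Int)).fmod 3) = 0 from by decide, show (((3:Int)).emod 3) = 0 from by decide, show (((4:Int)).fdiv 3) = 1 from by decide, show (((4:Int)).fmod 3) = 1 from by decide, show (((4:Int)).emod 3) = 1 from by decide, show (((5:Int)).fdiv 3) = 1 from by decide, show (((5:Int)).fmod 3) = 2 from by decide, show (((5:Int)).emod 3) = 2 from by decide, show (((6:Int)).fdiv 3) = 2 from by decide, show (((6:Int)).fmod 3) = 0 from by decide, show (((6:Int)).emod 3) = 0 from by decide, show (((7:Int)).fdiv 3) = 2 from by decide, show (((7:Int)).fmod 3) = 1 from by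 decide, show (((7:Int)).emod 3) = 1 from by decide, show (((8:Int)).fdiv 3) = 2 from by decide, show (((8:Int)).fmod 3) = 2 from by decide, show (((8:Int)).emod 3) = 2 from by decide, show (((0:Int)).fdiv 2) = 0 from by decide, show (((1:Int)).fdiv 2) = 0 from by decide, show (((2:Int)).fdiv 2) = 1 from by decide]
    by_cases h2 : indc = 2
    · subst h2; norm_num [PySem.Int.floordiv, PySem.Int.mod, show (((0:Int)).fdiv 3) = 0 from by decide, show (((0:Int)).fmod 3) = 0 from by decide, show (((0:Int)).emod 3) = 0 from by decide, show (((1:Int)).fdiv 3) = 0 from by decide, show (((1:Int)).fmod 3) = 1 from by decide, show (((1:Int)).emod 3) = 1 from by decide, show (((2:Int)).fdiv 3) = 0 from by decide, show (((2:Int)).fmod 3) = 2 from by decide, show (((2:Int)).emod 3) = 2 from by decide, show (((3:Int)).fdiv 3) = 1 from by decide, show (((3:Int)).fmod 3) = 0 from by decide, show (((3:Int)).emod 3) = 0 from by decide, show (((4:Int)).fdiv 3) = 1 from by decide, show (((4:Int)).fmod 3) = 1 from by decide, show (((4:Int)).emod 3) = 1 from by decide, show (((5:Int)).fdiv 3)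 = 1 from by decide, show (((5:Int)).fmod 3) = 2 from by decide, show (((5:Int)).emod 3) = 2 from by decide, show (((6:Int)).fdiv 3) = 2 from by decide, show (((6:Int)).fmod 3) = 0 from by decide, show (((6:Int)).emod 3) = 0 from by decide, show (((7:Int)).fdiv 3) = 2 from by decide, show (((7:Int)).fmod 3) = 1 from by decide, show (((7:Int)).emod 3) = 1 from by decide, show (((8:Int)).fdiv 3) = 2 from by decide, show (((8:Int)).fmod 3) = 2 from by decide, show (((8:Int)).emod 3) = 2 from by decide, show (((0:Int)).fdiv 2) = 0 from by decide, show (((1:Int)).fdiv 2) = 0 from by decide, show (((2:Int)).fdiv 2) = 1 from by decide]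
    by_cases h3 : indc = 3
    · subst h3; norm_num [PySem.Int.floordiv, PySem.Int.mod, show (((0:Int)).fdiv 3) = 0 from by decide, show (((0:Int)).fmod 3) = 0 from by decide, show (((0:Int)).emod 3) = 0 from by decide, show (((1:Int)).fdiv 3) = 0 from by decide, show (((1:Int)).fmod 3) = 1 from by decide, show (((1:Int)).emod 3) = 1 from by decide, show (((2:Int)).fdiv 3) = 0 from by decide, show (((2:Int)).fmod 3) = 2 from by decide, show (((2:Int)).emod 3) = 2 from by decide, show (((3:Int)).fdiv 3) = 1 from by decide, show (((3:Int)).fmod 3) = 0 from by decide, show (((3:Int)).emod 3) = 0 from by decide, show (((4:Int)).fdiv 3) = 1 from by decide, show (((4:Int)).fmod 3) = 1 from by decide, show (((4:Int)).emod 3) = 1 from by decide, show (((5:Int)).fdiv 3) = 1 from by decide, show (((5:Int)).fmod 3) = 2 from by decide, show (((5:Int)).emod 3) = 2 from by decide, show (((6:Int)).fdiv 3) = 2 from by decide, show (((6:Int)).fmod 3) = 0 from by decide, show (((6:Int)).emod 3) = 0 from by decide, show (((7:Int)).fdiv 3) = 2 from by decide, show (((7:Int)).fmod 3) = 1 from by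 decide, show (((7:Int)).emod 3) = 1 from by decide, show (((8:Int)).fdiv 3) = 2 from by decide, show (((8:Int)).fmod 3) = 2 from by decide, show (((8:Int)).emod 3) = 2 from by decide, show (((0:Int)).fdiv 2) = 0 from by decide, show (((1:Int)).fdiv 2) = 0 from by decide, show (((2:Int)).fdiv 2) = 1 from by decide] <;> try ring
      all_goals exact ⟨trivial, trivial⟩
    by_cases h4 : indc = 4
    · subst h4; norm_num [PySem.Int.floordiv, PySem.Int.mod, show (((0:Int)).fdiv 3) = 0 from by decide, show (((0:Int)).fmod 3) = 0 from by decide, show (((0:Int)).emod 3) = 0 from by decide, show (((1:Int)).fdiv 3) = 0 from by decide, show (((1:Int)).fmod 3) = 1 from by decide, show (((1:Int)).emod 3) = 1 from by decide, show (((2:Int)).fdiv 3) = 0 from by decide, show (((2:Int)).fmod 3) = 2 from by decide, show (((2:Int)).emod 3) = 2 from by decide, show (((3:Int)).fdiv 3) = 1 from by decide, show (((3:Int)).fmod 3) = 0 from by decide, show (((3:Int)).emod 3) = 0 from by decide, show (((4:Int)).fdiv 3) = 1 from by decide, show (((4:Int)).fmod 3) = 1 from by decide, show (((4:Int)).emod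 3) = 1 from by decide, show (((5:Int)).fdiv 3) = 1 from by decide, show (((5:Int)).fmod 3) = 2 from by decide, show (((5:Int)).emod 3) = 2 from by decide, show (((6:Int)).fdiv 3) = 2 from by decide, show (((6:Int)).fmod 3) = 0 from by decide, show (((6:Int)).emod 3) = 0 from by decide, show (((7:Int)).fdiv 3) = 2 from by decide, show (((7:Int)).fmod 3) = 1 from by decide, show (((7:Int)).emod 3) = 1 from by decide, show (((8:Int)).fdiv 3) = 2 from by decide, show (((8:Int)).fmod 3) = 2 from by decide, show (((8:Int)).emod 3) = 2 from by decide, show (((0:Int)).fdiv 2) = 0 from by decide, show (((1:Int)).fdiv 2) = 0 from by decide, show (((2:Int)).fdiv 2) = 1 from by decide]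
    by_cases h5 : indc = 5
    · subst h5; norm_num [PySem.Int.floordiv, PySem.Int.mod, show (((0:Int)).fdiv 3) = 0 from by decide, show (((0:Int)).fmod 3) = 0 from by decide, show (((0:Int)).emod 3) = 0 from by decide, show (((1:Int)).fdiv 3) = 0 from by decide, show (((1:Int)).fmod 3) = 1 from by decide, show (((1:Int)).emod 3) = 1 from by decide, show (((2:Int)).fdiv 3) = 0 from by decide, show (((2:Int)).fmod 3) = 2 from by decide, show (((2:Int)).emod 3) = 2 from by decide, show (((3:Int)).fdiv 3) = 1 from by decide, show (((3:Int)).fmod 3) = 0 from by decide, show (((3:Int)).emod 3) = 0 from by decide, show (((4:Int)).fdiv 3) = 1 from by decide, show (((4:Int)).fmod 3) = 1 from by decide, show (((4:Int)).emod 3) = 1 from by decide, show (((5:Int)).fdiv 3) = 1 from by decide, show (((5:Int)).fmod 3) = 2 from by decide, show (((5:Int)).emod 3) = 2 from by decide, show (((6:Int)).fdiv 3) = 2 from by decide, show (((6:Int)).fmod 3) = 0 from by decide, show (((6:Int)).emod 3) = 0 from by decide, show (((7:Int)).fdiv 3) = 2 from by decide, show (((7:Int)).fmod 3) = 1 from by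 decide, show (((7:Int)).emod 3) = 1 from by decide, show (((8:Int)).fdiv 3) = 2 from by decide, show (((8:Int)).fmod 3) = 2 from by decide, show (((8:Int)).emod 3) = 2 from by decide, show (((0:Int)).fdiv 2) = 0 from by decide, show (((1:Int)).fdiv 2) = 0 from by decide, show (((2:Int)).fdiv 2) = 1 from by decide] <;> try ring
      all_goals exact ⟨trivial, trivial⟩
    by_cases h6 : indc = 6
    · subst h6; norm_num [PySem.Int.floordiv, PySem.Int.mod, show (((0:Int)).fdiv 3) = 0 from by decide, show (((0:Int)).fmod 3) = 0 from by decide, show (((0:Int)).emod 3) = 0 from by decide, show (((1:Int)).fdiv 3) = 0 from by decide, show (((1:Int)).fmod 3) = 1 from by decide, show (((1:Int)).emod 3) = 1 from by decide, show (((2:Int)).fdiv 3) = 0 from by decide, show (((2:Int)).fmod 3) = 2 from by decide, show (((2:Int)).emod 3) = 2 from by decide, show (((3:Int)).fdiv 3) = 1 from by decide, show (((3:Int)).fmod 3) = 0 from by decide, show (((3:Int)).emod 3) = 0 from by decide, show (((4:Int)).fdiv 3) = 1 from by decide, show (((4:Int)).fmod 3) = 1 from by decide, show (((4:Int)).emod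 3) = 1 from by decide, show (((5:Int)).fdiv 3) = 1 from by decide, show (((5:Int)).fmod 3) = 2 from by decide, show (((5:Int)).emod 3) = 2 from by decide, show (((6:Int)).fdiv 3) = 2 from by decide, show (((6:Int)).fmod 3) = 0 from by decide, show (((6:Int)).emod 3) = 0 from by decide, show (((7:Int)).fdiv 3) = 2 from by decide, show (((7:Int)).fmod 3) = 1 from by decide, show (((7:Int)).emod 3) = 1 from by decide, show (((8:Int)).fdiv 3) = 2 from by decide, show (((8:Int)).fmod 3) = 2 from by decide, show (((8:Int)).emod 3) = 2 from by decide, show (((0:Int)).fdiv 2) = 0 from by decide, show (((1:Int)).fdiv 2) = 0 from by decide, show (((2:Int)).fdiv 2) = 1 from by decide] <;> try ring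
      all_goals exact ⟨trivial, trivial⟩
    by_cases h7 : indc = 7
    · subst h7; norm_num [PySem.Int.floordiv, PySem.Int.mod, show (((0:Int)).fdiv 3) = 0 from by decide, show (((0:Int)).fmod 3) = 0 from by decide, show (((0:Int)).emod 3) = 0 from by decide, show (((1:Int)).fdiv 3) = 0 from by decide, show (((1:Int)).fmod 3) = 1 from by decide, show (((1:Int)).emod 3) = 1 from by decide, show (((2:Int)).fdiv 3) = 0 from by decide, show (((2:Int)).fmod 3) = 2 from by decide, show (((2:Int)).emod 3) = 2 from by decide, show (((3:Int)).fdiv 3) = 1 from by decide, show (((3:Int)).fmod 3) = 0 from by decide, show (((3:Int)).emod 3) = 0 from by decide, show (((4:Int)).fdiv 3) = 1 from by decide, show (((4:Int)).fmod 3) = 1 from by decide, show (((4:Int)).emod 3) = 1 from by decide, show (((5:Int)).fdiv 3) = 1 from by decide, show (((5:Int)).fmod 3) = 2 from by decide, show (((5:Int)).emod 3) = 2 from by decide, show (((6:Int)).fdiv 3) = 2 from by decide, show (((6:Int)).fmod 3) = 0 from by decide, show (((6:Int)).emod 3) = 0 from by decide, show (((7:Int)).fdiv 3) = 2 from by decide,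 show (((7:Int)).fmod 3) = 1 from by decide, show (((7:Int)).emod 3) = 1 from by decide, show (((8:Int)).fdiv 3) = 2 from by decide, show (((8:Int)).fmod 3) = 2 from by decide, show (((8:Int)).emod 3) = 2 from by decide, show (((0:Int)).fdiv 2) = 0 from by decide, show (((1:Int)).fdiv 2) = 0 from by decide, show (((2:Int)).fdiv 2) = 1 from by decide] <;> try ring
      all_goals exact ⟨trivial, trivial⟩
    by_cases h8 : indc = 8
    · subst h8; norm_num [PySem.Int.floordiv, PySem.Int.mod, show (((0:Int)).fdiv 3) = 0 from by decide, show (((0:Int)).fmod 3) = 0 from by decide, show (((0:Int)).emod 3) = 0 from by decide, show (((1:Int)).fdiv 3) = 0 from by decide, show (((1:Int)).fmod 3) = 1 from by decide, show (((1:Int)).emod 3) = 1 from by decide, show (((2:Int)).fdiv 3) = 0 from by decide, show (((2:Int)).fmod 3) = 2 from by decide, show (((2:Int)).emod 3) = 2 from by decide, show (((3:Int)).fdiv 3) = 1 from by decide, show (((3:Int)).fmod 3) = 0 from by decide, show (((3:Int)).emod 3) = 0 from by decide, show (((4:Int)).fdiv 3) = 1 from by decide, show (((4:Int)).fmod 3)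 = 1 from by decide, show (((4:Int)).emod 3) = 1 from by decide, show (((5:Int)).fdiv 3) = 1 from by decide, show (((5:Int)).fmod 3) = 2 from by decide, show (((5:Int)).emod 3) = 2 from by decide, show (((6:Int)).fdiv 3) = 2 from by decide, show (((6:Int)).fmod 3) = 0 from by decide, show (((6:Int)).emod 3) = 0 from by decide, show (((7:Int)).fdiv 3) = 2 from by decide, show (((7:Int)).fmod 3) = 1 from by decide, show (((7:Int)).emod 3) = 1 from by decide, show (((8:Int)).fdiv 3) = 2 from by decide, show (((8:Int)).fmod 3) = 2 from by decide, show (((8:Int)).emod 3) = 2 from by decide, show (((0:Int)).fdiv 2) = 0 from by decide, show (((1:Int)).fdiv 2) = 0 from by decide, show (((2:Int)).fdiv 2) = 1 from by decide] <;> try ring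
      all_goals exact ⟨trivial, trivial⟩
    -- remaining case: indc outside 1..8, B's grid guard is false
    have hguard : ¬ (1 ≤ indc ∧ indc ≤ 8) := by
      rintro ⟨hl, hr⟩; omega
    simp [h1, h2, h3, h4, h5, h6, h7, h8, hguard]
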